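-- pv_equiv track=rewrite | github.com/ghdwpaks/team_yatch | 1dev_util.py | upper
-- ===== SOURCE A (Python) =====
-- def upper(dice) :
--     res = []
--     for j in range(1,7):
--         temp = 0
--         for i in range(len(dice)) :
--             if dice[i] == j :
--                 temp += j
--         res.append(temp)
--     return res
-- ===== SOURCE B (Python) =====
-- def upper(dice):
--     counts = {}
--     for d in dice:
--         counts[d] = counts.get(d, 0) + 1
--     return [j * counts.get(j, 0) for j in range(1, 7)]
-- ===== Notes on version B (the rewrite author's own statement) =====
-- stated objective: simpler
-- what changed: One frequency-table pass over dice plus a 6-element comprehension j*count[j] replaces six full scans of dice.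
import Mathlib
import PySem

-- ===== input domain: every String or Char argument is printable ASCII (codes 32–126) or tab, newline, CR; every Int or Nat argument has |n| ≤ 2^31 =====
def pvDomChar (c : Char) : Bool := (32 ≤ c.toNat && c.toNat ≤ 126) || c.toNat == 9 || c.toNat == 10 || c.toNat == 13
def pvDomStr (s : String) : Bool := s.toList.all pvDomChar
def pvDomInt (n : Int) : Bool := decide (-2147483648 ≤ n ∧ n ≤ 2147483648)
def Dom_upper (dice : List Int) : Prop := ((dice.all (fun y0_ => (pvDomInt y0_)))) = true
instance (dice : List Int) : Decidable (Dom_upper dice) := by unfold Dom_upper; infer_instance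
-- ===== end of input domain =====

-- B replaces A's six full scans of dice by one frequency-dict pass plus a 6-element map (simpler).

-- ===== PORT A =====
def upper (dice : List Int) : List Int :=
  (PySem.List.pyRange 1 7 1).foldl (fun res j =>
    res ++ [(PySem.List.pyRange 0 (dice.length : Int) 1).foldl
      (fun temp i => if PySem.List.pyGetD dice i 0 == j then temp + j else temp) 0]) []

-- ===== PORT B =====
def upper_alt (dice : List Int) : List Int :=
  let counts := dice.foldl (fun d x => d.insert x (d.getD x 0 + 1)) (PySem.Dict.empty : PySem.Dict Int Int)
  (PySem.List.pyRange 1 7 1).map (fun j => j * counts.getD j 0)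

-- ===== PRECONDITION & SPEC =====
def Spec_upper (dice : List Int) (out : List Int) : Prop := out = upper_alt dice
instance (dice : List Int) (out : List Int) : Decidable (Spec_upper dice out) := by unfold Spec_upper; infer_instance

-- ===== CLAIM (what is proved, stated in full; the proofs are below) =====
def Claim_equal_upper : Prop := ∀ (dice : List Int), Dom_upper dice → Spec_upper dice (upper dice)

-- ===== LEMMAS AND PROOFS =====
theorem upper_inner_count (dice : List Int) (j t : Int) :
    dice.foldl (fun temp x => if x == j then temp + j else temp) t = t + j * dice.count j := by
  induction dice generalizing t with
  | nil => simp
  | cons x xs ih =>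
    simp only [List.foldl_cons, List.count_cons, ih]
    by_cases h : x = j
    · simp [h]; ring
    · simp [h]

-- ===== VERDICT (by name: the statement is the Claim_ definition above) =====
theorem upper_spec : Claim_equal_upper := by
  intro dice _
  unfold Spec_upper upper upper_alt
  rw [PySem.List.foldl_append_singleton_eq_map]
  simp only [List.nil_append]
  refine List.map_congr_left ?_
  intro j _
  rw [PySem.List.foldl_pyRange_zero_pyGetD' dice 0
        (fun temp x => if x == j then temp + j else temp) 0,
      upper_inner_count, PySem.Dict.getD_foldl_insert_add_one]
  simp
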